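-- pv_equiv track=rewrite | github.com/pereirawe/ia-curriculum | services/whatsapp_service.py | _clean_contact_name
-- ===== SOURCE A (Python) =====
-- def _clean_contact_name(name):
--     name = name.strip()
--     parts = name.split()
--
--     cleaned_parts = []
--     i = 0
--     while i < len(parts):
--         if (
--             i < len(parts) - 1
--             and len(parts[i]) == 1
--             and len(parts[i + 1]) == 1
--             and parts[i].isalpha()
--             and parts[i + 1].isalpha()
--         ):
--
--             combined = []
--             while i < len(parts) and len(parts[i]) == 1 and parts[i].isalpha():
--                 combined.append(parts[i])
--                 i += 1
--             cleaned_parts.append("".join(combined))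
--         else:
--             cleaned_parts.append(parts[i])
--             i += 1
--
--     lowercase_particles = {"de", "do", "da", "dos", "das", "e"}
--     cleaned_name_parts = []
--     for i, part in enumerate(cleaned_parts):
--         if i > 0 and part.lower() in lowercase_particles:
--             cleaned_name_parts.append(part.lower())
--         else:
--             cleaned_name_parts.append(part.capitalize())
--
--     return " ".join(cleaned_name_parts)
-- ===== SOURCE B (Python) =====
-- def _clean_contact_name(name):
--     # Character-level rewrite: normalize whitespace by re-joining the tokens,
--     # then delete every space that sits between two lone alphabetic letters
--     # (a single scan over the characters; no run/grouping pass over tokens).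
--     s = " ".join(name.strip().split())
--
--     out = []
--     for k in range(len(s)):
--         if s[k] == " " and _lone(s, k - 1) and _lone(s, k + 1):
--             continue
--         out.append(s[k])
--     merged = "".join(out)
--
--     particles = {"de", "do", "da", "dos", "das", "e"}
--     toks = merged.split()
--     if not toks:
--         return ""
--     tail = [t.lower() if t.lower() in particles else t.capitalize() for t in toks[1:]]
--     return " ".join([toks[0].capitalize()] + tail)
--
--
-- def _lone(s, k):
--     # s[k] is a whole token consisting of one alphabetic character
--     return (
--         0 <= k < len(s)
--         and s[k].isalpha()
--         and (k == 0 or s[k - 1] == " ")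
--         and (k == len(s) - 1 or s[k + 1] == " ")
--     )
-- ===== Notes on version B (the rewrite author's own statement) =====
-- stated objective: alternative
-- what changed: A merges runs of single-letter tokens with a token-level index walk (nested while loops); B instead re-joins the tokens into one string and does a single character-level scan that deletes every space flanked on both sides by a lone alphabetic letter, then splits again and capitalizes the head token and maps the tail (no run/grouping pass over tokens at all).
import Mathlib
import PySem

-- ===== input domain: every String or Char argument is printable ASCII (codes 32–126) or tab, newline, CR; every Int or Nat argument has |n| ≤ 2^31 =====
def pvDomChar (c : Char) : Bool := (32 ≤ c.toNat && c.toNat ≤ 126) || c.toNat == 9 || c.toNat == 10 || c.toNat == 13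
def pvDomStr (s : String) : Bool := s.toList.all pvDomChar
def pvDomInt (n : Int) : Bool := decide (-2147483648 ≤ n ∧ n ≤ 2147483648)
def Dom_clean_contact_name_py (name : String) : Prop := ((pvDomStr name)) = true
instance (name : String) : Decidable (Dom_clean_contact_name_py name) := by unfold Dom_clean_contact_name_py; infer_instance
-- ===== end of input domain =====

-- B replaces A's token-level run-merging loop by a single character-level scan over the
-- space-normalized string that deletes each space flanked by two lone letters; objective: alternative.

-- shared helper: Python's `len(t) == 1 and t.isalpha()` on a token
def isInitial (t : List Char) : Bool := t.length == 1 && PySem.Chars.strIsalpha t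

-- shared helper: hand port of str.capitalize() — first char uppercased, rest lowercased (exact on ASCII)
def capTok (t : List Char) : List Char :=
  match t with
  | [] => []
  | c :: cs => PySem.Chars.upperChar c :: PySem.Chars.lower cs

def particleList : List (List Char) :=
  [['d','e'], ['d','o'], ['d','a'], ['d','o','s'], ['d','a','s'], ['e']]

-- ===== PORT A =====
-- A's body of the enumerate pass: lowercase a non-leading particle, else capitalize
def fixTok (i : Int) (t : List Char) : List Char :=
  if i > 0 && particleList.contains (PySem.Chars.lower t) then PySem.Chars.lower t
  else capTok t

-- inner `while i < len(parts) and len(parts[i]) == 1 and parts[i].isalpha():` — returns (combined, rest)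
def runA : List (List Char) → List (List Char) × List (List Char)
  | [] => ([], [])
  | t :: rest =>
      if isInitial t then
        let pr := runA rest
        (t :: pr.1, pr.2)
      else ([], t :: rest)

theorem runA_snd_length_le (l : List (List Char)) : (runA l).2.length ≤ l.length := by
  induction l with
  | nil => simp [runA]
  | cons t rest ih =>
      by_cases h : isInitial t = true <;> simp [runA, h] <;> omega

-- outer `while i < len(parts):` of A
def mergeA : List (List Char) → List (List Char)
  | [] => []
  | t :: rest =>
      if h : (match rest with | u :: _ => isInitial t && isInitial u | [] => false) = true then
        PySem.Chars.join [] (runA (t :: rest)).1 :: mergeA (runA (t :: rest)).2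
      else
        t :: mergeA rest
termination_by l => l.length
decreasing_by
  · have ht : isInitial t = true := by
      cases rest with
      | nil => simp at h
      | cons u us => exact (Bool.and_eq_true ..|>.mp h).1
    simp only [runA, ht, if_pos]
    exact Nat.lt_succ_of_le (runA_snd_length_le rest)
  · simp

def clean_contact_name_py (name : String) : String :=
  let stripped := PySem.Chars.strip name.toList
  let parts := PySem.Chars.split₀ stripped
  let cleaned := mergeA parts
  let cleanedName := (PySem.List.enumerate cleaned 0).foldl
    (fun acc p => acc ++ [fixTok p.1 p.2]) []
  String.mk (PySem.Chars.join [' '] cleanedName)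

-- ===== PORT B =====
-- `_lone(s, k)`: s[k] is a whole token consisting of one alphabetic character
-- (every s[...] access is reached only when its index is in range, so pyGet? is exact;
--  the .getD default of the guarded alpha test is never used)
def loneB (s : List Char) (k : Int) : Bool :=
  decide (0 ≤ k) && decide (k < (s.length : Int)) &&
  PySem.Chars.isalpha ((PySem.List.pyGet? s k).getD ' ') &&
  (decide (k = 0) || (PySem.List.pyGet? s (k-1) == some ' ')) &&
  (decide (k = (s.length : Int) - 1) || (PySem.List.pyGet? s (k+1) == some ' '))

-- the `continue` condition of B's character scan
def condB (s : List Char) (k : Int) : Bool :=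
  (PySem.List.pyGet? s k == some ' ') && loneB s (k-1) && loneB s (k+1)

-- B's tail comprehension body
def fixTail (t : List Char) : List Char :=
  if particleList.contains (PySem.Chars.lower t) then PySem.Chars.lower t else capTok t

def clean_contact_name_py_alt (name : String) : String :=
  let s := PySem.Chars.join [' '] (PySem.Chars.split₀ (PySem.Chars.strip name.toList))
  let merged := (PySem.List.pyRange 0 (s.length : Int) 1).foldl
      (fun out k => if condB s k then out else out ++ [(PySem.List.pyGet? s k).getD ' ']) []
  match PySem.Chars.split₀ merged with
  | [] => ""
  | h :: rest => String.mk (PySem.Chars.join [' '] (capTok h :: rest.map fixTail))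

-- ===== PRECONDITION & SPEC =====
def Spec_clean_contact_name_py (name : String) (out : String) : Prop := out = clean_contact_name_py_alt name
instance (name : String) (out : String) : Decidable (Spec_clean_contact_name_py name out) := by unfold Spec_clean_contact_name_py; infer_instance

-- ===== CLAIM (what is proved, stated in full; the proofs are below) =====
def Claim_equal_clean_contact_name_py : Prop := ∀ (name : String), Dom_clean_contact_name_py name → Spec_clean_contact_name_py name (clean_contact_name_py name)

-- ===== LEMMAS AND PROOFS =====

-- a good token: nonempty and free of whitespace (what split() produces)
def goodTok (t : List Char) : Prop := t ≠ [] ∧ ∀ c ∈ t, PySem.Chars.isspace c = false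

-- the separator glue B's scan leaves between two consecutive original tokens
def glue : List Char → List (List Char) → List Char
  | _, [] => []
  | t, u :: more => (if isInitial t && isInitial u then [] else [' ']) ++ u ++ glue u more

theorem alpha_not_space (c : Char) (h : PySem.Chars.isalpha c = true) :
    PySem.Chars.isspace c = false := by
  simp [PySem.Chars.isalpha, PySem.Chars.isupper, PySem.Chars.islower, Char.le_def] at h
  unfold PySem.Chars.isspace
  simp only [Bool.or_eq_false_iff, decide_eq_false_iff_not, Bool.and_eq_false_iff, Char.toNat]
  have e1 : (65 : UInt32).toNat = 65 := rfl
  have e2 : (90 : UInt32).toNat = 90 := rfl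
  have e3 : (97 : UInt32).toNat = 97 := rfl
  have e4 : (122 : UInt32).toNat = 122 := rfl
  rcases h with ⟨a, b⟩ | ⟨a, b⟩ <;>
    exact by
      have a' := UInt32.le_iff_toNat_le.mp a
      have b' := UInt32.le_iff_toNat_le.mp b
      simp only [e1, e2, e3, e4] at a' b'
      omega

-- `join` unfoldings
theorem join_cons (a : List Char) (l : List (List Char)) :
    PySem.Chars.join [' '] (a :: l)
      = a ++ (if l.isEmpty then [] else ' ' :: PySem.Chars.join [' '] l) := by
  cases l with
  | nil => simp [PySem.Chars.join_singleton]
  | cons b l' => simp [PySem.Chars.join_cons_cons]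

theorem join0_cons (a : List Char) (l : List (List Char)) :
    PySem.Chars.join [] (a :: l) = a ++ PySem.Chars.join [] l := by
  cases l with
  | nil => simp [PySem.Chars.join_singleton, PySem.Chars.join_nil]
  | cons b l' => simp [PySem.Chars.join_cons_cons]

-- split₀.go facts
theorem go_acc (s : List Char) : ∀ cur acc,
    PySem.Chars.split₀.go s cur acc = acc.reverse ++ PySem.Chars.split₀.go s cur [] := by
  induction s with
  | nil => intro cur acc; by_cases h : cur.isEmpty <;> simp [PySem.Chars.split₀.go, h]
  | cons c rest ih =>
      intro cur acc
      by_cases h : PySem.Chars.isspace c = true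
      · by_cases h2 : cur.isEmpty
        · simp only [PySem.Chars.split₀.go, h, h2, if_true]
          exact ih [] acc
        · simp only [PySem.Chars.split₀.go, h, if_true, h2, if_false]
          rw [ih [] (cur.reverse :: acc), ih [] [cur.reverse]]
          simp
      · simp only [PySem.Chars.split₀.go, h]
        exact ih _ _

theorem go_tokens (s : List Char) : ∀ cur, (∀ c ∈ cur, PySem.Chars.isspace c = false) →
    ∀ t ∈ PySem.Chars.split₀.go s cur [], goodTok t := by
  induction s with
  | nil =>
      intro cur hcur t ht
      by_cases h2 : cur.isEmpty
      · simp [PySem.Chars.split₀.go, h2] at ht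
      · simp [PySem.Chars.split₀.go, h2] at ht
        subst ht
        refine ⟨by simpa using (List.isEmpty_eq_false_iff.mp (by simpa using h2)), ?_⟩
        intro c hc
        exact hcur c (by simpa using hc)
  | cons c rest ih =>
      intro cur hcur t ht
      by_cases h : PySem.Chars.isspace c = true
      · cases h2 : cur.isEmpty with
        | true =>
          simp only [PySem.Chars.split₀.go, h, h2, if_true] at ht
          exact ih [] (by simp) t ht
        | false =>
          simp only [PySem.Chars.split₀.go, h, h2, Bool.false_eq_true, if_true, if_false] at ht
          rw [go_acc] at ht
          simp only [List.reverse_cons, List.reverse_nil, List.nil_append,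
            List.singleton_append] at ht
          rcases List.mem_cons.mp ht with rfl | ht
          · refine ⟨by simpa using (List.isEmpty_eq_false_iff.mp h2), ?_⟩
            intro d hd
            exact hcur d (by simpa using hd)
          · exact ih [] (by simp) t ht
      · simp only [PySem.Chars.split₀.go, h] at ht
        refine ih (c :: cur) ?_ t ht
        intro d hd
        rcases List.mem_cons.mp hd with rfl | hd
        · simpa using h
        · exact hcur d hd

theorem go_nospace (t : List Char) (h : ∀ c ∈ t, PySem.Chars.isspace c = false) :
    ∀ s cur acc, PySem.Chars.split₀.go (t ++ s) cur acc
      = PySem.Chars.split₀.go s (t.reverse ++ cur) acc := by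
  induction t with
  | nil => simp
  | cons c t' ih =>
      intro s cur acc
      have hc : PySem.Chars.isspace c = false := h c (by simp)
      simp only [List.cons_append, PySem.Chars.split₀.go, hc, Bool.false_eq_true, if_false]
      rw [ih (fun d hd => h d (by simp [hd])) s (c :: cur) acc]
      simp

theorem go_join (l : List (List Char)) (hl : ∀ t ∈ l, goodTok t) (hne : l ≠ []) :
    ∀ acc, PySem.Chars.split₀.go (PySem.Chars.join [' '] l) [] acc = acc.reverse ++ l := by
  induction l with
  | nil => exact absurd rfl hne
  | cons t rest ih =>
      intro acc
      obtain ⟨htne, htns⟩ := hl t (by simp)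
      cases rest with
      | nil =>
          rw [PySem.Chars.join_singleton]
          have : t = t ++ ([] : List Char) := by simp
          rw [this, go_nospace t htns [] [] acc]
          have h2 : (t.reverse ++ ([] : List Char)).isEmpty = false := by
            simpa using htne
          simp [PySem.Chars.split₀.go, h2, htne]
      | cons u more =>
          have hJ : PySem.Chars.join [' '] (t :: u :: more)
              = t ++ (' ' :: PySem.Chars.join [' '] (u :: more)) := by
            rw [PySem.Chars.join_cons_cons]; simp
          rw [hJ, go_nospace t htns]
          have hsp : PySem.Chars.isspace ' ' = true := by decide
          have h2 : (t.reverse ++ ([] : List Char)).isEmpty = false := by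
            simpa using htne
          simp only [PySem.Chars.split₀.go, hsp, if_true, h2, if_false]
          have hrw := ih (fun v hv => hl v (by simp [hv])) (by simp)
            ((t.reverse ++ []).reverse :: acc)
          rw [hrw]
          simp

theorem split₀_join (l : List (List Char)) (hl : ∀ t ∈ l, goodTok t) :
    PySem.Chars.split₀ (PySem.Chars.join [' '] l) = l := by
  cases l with
  | nil => simp [PySem.Chars.join_nil, PySem.Chars.split₀, PySem.Chars.split₀.go]
  | cons t rest =>
      have := go_join (t :: rest) hl (by simp) []
      simpa [PySem.Chars.split₀] using this

theorem split₀_tokens (s : List Char) : ∀ t ∈ PySem.Chars.split₀ s, goodTok t := by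
  intro t ht
  exact go_tokens s [] (by simp) t ht

-- mergeA facts
theorem runA_eq (l : List (List Char)) :
    runA l = (l.takeWhile isInitial, l.dropWhile isInitial) := by
  induction l with
  | nil => simp [runA]
  | cons t rest ih =>
      by_cases h : isInitial t = true <;> simp [runA, h, ih, List.takeWhile, List.dropWhile]

theorem mergeA_cons (t : List Char) (rest : List (List Char)) :
    mergeA (t :: rest) =
      if (match rest with | u :: _ => isInitial t && isInitial u | [] => false) = true then
        PySem.Chars.join [] (runA (t :: rest)).1 :: mergeA (runA (t :: rest)).2
      else t :: mergeA rest := by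
  rw [mergeA.eq_def]
  rfl

theorem mergeA_nil : mergeA [] = [] := by
  rw [mergeA.eq_def]

theorem mergeA_singleton (t : List Char) : mergeA [t] = [t] := by
  rw [mergeA_cons]
  simp [mergeA_nil]

theorem mergeA_cons2 (t u : List Char) (more : List (List Char)) :
    mergeA (t :: u :: more)
      = if isInitial t && isInitial u then
          PySem.Chars.join [] ((t :: u :: more).takeWhile isInitial)
            :: mergeA ((t :: u :: more).dropWhile isInitial)
        else t :: mergeA (u :: more) := by
  rw [mergeA_cons, runA_eq]

theorem mergeA_ne_nil (t : List Char) (rest : List (List Char)) : mergeA (t :: rest) ≠ [] := by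
  cases rest with
  | nil => simp [mergeA_singleton]
  | cons u more =>
      rw [mergeA_cons2]
      split <;> simp

theorem join0_mem (l : List (List Char)) (c : Char) (hc : c ∈ PySem.Chars.join [] l) :
    ∃ t ∈ l, c ∈ t := by
  induction l with
  | nil => simp [PySem.Chars.join_nil] at hc
  | cons t rest ih =>
      rw [join0_cons] at hc
      rcases List.mem_append.mp hc with h | h
      · exact ⟨t, by simp, h⟩
      · obtain ⟨u, hu, hcu⟩ := ih h
        exact ⟨u, by simp [hu], hcu⟩

theorem initial_good (t : List Char) (h : isInitial t = true) : goodTok t := by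
  obtain ⟨h1, h2⟩ := Bool.and_eq_true ..|>.mp h
  refine ⟨by rintro rfl; simp at h1, ?_⟩
  intro c hc
  have := (Bool.and_eq_true ..|>.mp h2).2
  exact alpha_not_space c (by simpa using (List.all_eq_true.mp this c hc))

theorem mergeA_good_aux : ∀ (n : Nat) (l : List (List Char)), l.length ≤ n →
    (∀ t ∈ l, goodTok t) → ∀ t ∈ mergeA l, goodTok t := by
  intro n
  induction n with
  | zero =>
      intro l hl _
      have : l = [] := List.eq_nil_of_length_eq_zero (Nat.le_zero.mp hl)
      subst this; rw [mergeA_nil]; simp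
  | succ n ih =>
      intro l hlen hgood t ht
      match l with
      | [] => rw [mergeA_nil] at ht; simp at ht
      | [x] =>
        rw [mergeA_singleton] at ht
        simp at ht
        subst ht
        exact hgood t (by simp)
      | x :: u :: us =>
        rw [mergeA_cons2] at ht
        by_cases hc : (isInitial x && isInitial u) = true
        · have hx : isInitial x = true := (Bool.and_eq_true ..|>.mp hc).1
          simp only [hc, if_true] at ht
          rcases List.mem_cons.mp ht with rfl | ht
          · constructor
            · rw [List.takeWhile_cons, if_pos hx, join0_cons]
              obtain ⟨hne, _⟩ := hgood x (by simp)
              simp [hne]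
            · intro c hc'
              obtain ⟨v, hv, hcv⟩ := join0_mem _ c hc'
              have hv' : isInitial v = true := List.mem_takeWhile_imp hv
              exact (initial_good v hv').2 c hcv
          · refine ih ((x :: u :: us).dropWhile isInitial) ?_ ?_ t ht
            · rw [List.dropWhile_cons, if_pos hx]
              calc ((u :: us).dropWhile isInitial).length ≤ (u :: us).length :=
                    List.length_dropWhile_le ..
                _ ≤ n := by simpa using hlen
            · intro v hv
              exact hgood v (List.dropWhile_sublist _ |>.mem hv)
        · simp only [hc, if_false] at ht
          rcases List.mem_cons.mp ht with rfl | ht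
          · exact hgood t (by simp)
          · exact ih (u :: us) (by simpa using hlen)
              (fun v hv => hgood v (by simp [hv])) t ht

theorem mergeA_good (l : List (List Char)) (hl : ∀ t ∈ l, goodTok t) :
    ∀ t ∈ mergeA l, goodTok t := mergeA_good_aux l.length l le_rfl hl

-- J (mergeA l) = head ++ glue head tail
theorem J_mergeA : ∀ (n : Nat) (t : List Char) (rest : List (List Char)),
    (t :: rest).length ≤ n → (∀ u ∈ t :: rest, goodTok u) →
    PySem.Chars.join [' '] (mergeA (t :: rest)) = t ++ glue t rest := by
  intro n
  induction n with
  | zero => intro t rest hlen; simp at hlen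
  | succ n ih =>
      intro t rest hlen hgood
      cases rest with
      | nil => simp [mergeA_singleton, PySem.Chars.join_singleton, glue]
      | cons u more =>
        rw [mergeA_cons2]
        by_cases hc : (isInitial t && isInitial u) = true
        · have ht : isInitial t = true := (Bool.and_eq_true ..|>.mp hc).1
          -- the merged run, consumed token by token
          have run : ∀ (r : List (List Char)) (t' : List Char), r.length ≤ n →
              isInitial t' = true → (∀ v ∈ r, goodTok v) →
              (t' ++ PySem.Chars.join [] (r.takeWhile isInitial)) ++
                (if (r.dropWhile isInitial).isEmpty then []
                 else ' ' :: PySem.Chars.join [' '] (mergeA (r.dropWhile isInitial)))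
              = t' ++ glue t' r := by
            intro r
            induction r with
            | nil => intro t' _ _ _; simp [PySem.Chars.join_nil, glue]
            | cons v more' ihr =>
                intro t' hlen' ht' hgood'
                by_cases hv : isInitial v = true
                · rw [List.takeWhile_cons, if_pos hv, List.dropWhile_cons, if_pos hv, join0_cons]
                  have hrec := ihr v (by simp at hlen' ⊢; omega) hv
                    (fun w hw => hgood' w (by simp [hw]))
                  have e : glue t' (v :: more') = v ++ glue v more' := by
                    simp [glue, ht', hv]
                  rw [e, ← hrec]
                  simp
                · have hv' : isInitial v = false := by simpa using hv
                  rw [List.takeWhile_cons, List.dropWhile_cons]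
                  simp only [hv', Bool.false_eq_true, if_false, PySem.Chars.join_nil]
                  have hrec := ih v more' (by simp at hlen' ⊢; omega) hgood'
                  simp only [List.isEmpty_cons, Bool.false_eq_true, if_false]
                  rw [hrec]
                  simp [glue, ht', hv']
          rw [if_pos hc, List.takeWhile_cons, if_pos ht, List.dropWhile_cons, if_pos ht]
          rw [join_cons, join0_cons]
          have hdm : ((u :: more).dropWhile isInitial).isEmpty
              = (mergeA ((u :: more).dropWhile isInitial)).isEmpty := by
            cases h : (u :: more).dropWhile isInitial with
            | nil => simp [mergeA_nil]
            | cons a b => simp [List.isEmpty_eq_false_iff.mpr (mergeA_ne_nil a b)]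
          have hr := run (u :: more) t (by simpa using hlen) ht
            (fun v hv => hgood v (by simp [hv]))
          rw [← hr, hdm]
        · rw [if_neg hc]
          have hne : mergeA (u :: more) ≠ [] := mergeA_ne_nil u more
          rw [join_cons]
          simp only [List.isEmpty_eq_false_iff.mpr hne, if_false]
          rw [ih u more (by simpa using hlen) (fun v hv => hgood v (by simp [hv]))]
          have hcf : (isInitial t && isInitial u) = false := by simpa using hc
          simp [glue, hcf]

-- ===== B-side: the character scan =====

theorem map_getD_range (s : List Char) :
    (List.range s.length).map (fun k => s.getD k ' ') = s := by
  apply List.ext_getElem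
  · simp
  · intro i h1 h2
    simp [List.getD_eq_getElem?_getD, List.getElem?_eq_getElem h2]

theorem condB_false_of_not_space (s : List Char) (k : Int)
    (h : (PySem.List.pyGet? s k == some ' ') = false) : condB s k = false := by
  unfold condB
  rw [h]
  simp

-- the scan as filter-map over Nat indices
def keepScan (s : List Char) : List Char :=
  ((List.range s.length).filter (fun (k : Nat) => !condB s (k : Int))).map
    (fun (k : Nat) => s.getD k ' ')

theorem scan_eq_keepScan (s : List Char) :
    (PySem.List.pyRange 0 (s.length : Int) 1).foldl
      (fun out k => if condB s k then out else out ++ [(PySem.List.pyGet? s k).getD ' ']) []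
    = keepScan s := by
  rw [PySem.List.pyRange_one]
  have e : ((s.length : Int) - 0).toNat = s.length := by simp
  rw [e, List.foldl_map]
  rw [PySem.List.foldl_congr_mem _ _
    (fun (out : List Char) (k : Nat) =>
      if (!condB s (k : Int)) = true then out ++ [s.getD k ' '] else out) _ ?_]
  · rw [PySem.List.foldl_append_if (fun (k : Nat) => !condB s (k : Int))
      (fun (k : Nat) => s.getD k ' ')]
    simp [keepScan]
  · intro out k _
    have h0 : (0 : Int) + k = (k : Int) := by ring
    have hg : (PySem.List.pyGet? s ((k : Int))).getD ' ' = s.getD k ' ' := by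
      rw [PySem.List.pyGet?_natCast, List.getD_eq_getElem?_getD]
    simp only [h0]
    cases h : condB s (k : Int) <;> simp [h, hg]

theorem pyGet?_shift (P rest : List Char) : ∀ (j : Nat),
    PySem.List.pyGet? (P ++ rest) ((P.length : Int) + j) = PySem.List.pyGet? rest j := by
  intro j
  have e : (P.length : Int) + j = ((P.length + j : Nat) : Int) := by push_cast; ring
  rw [e, PySem.List.pyGet?_natCast, PySem.List.pyGet?_natCast,
    List.getElem?_append_right (by omega)]
  simp

-- shift: loneB only looks at a 3-char window and the two end tests
theorem loneB_shift (P rest : List Char) (m : Nat)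
    (h : 1 ≤ m ∨ P.getLast? = some ' ') :
    loneB (P ++ rest) ((P.length : Int) + m) = loneB rest m := by
  have key := pyGet?_shift P rest
  unfold loneB
  have e0 : decide (0 ≤ (P.length : Int) + m) = decide (0 ≤ (m : Int)) := by
    rw [decide_eq_decide]; omega
  have e2 : decide ((P.length : Int) + m < (((P ++ rest).length : Nat) : Int))
      = decide ((m : Int) < (rest.length : Int)) := by
    simp only [List.length_append]; rw [decide_eq_decide]; push_cast; omega
  have e5d : decide ((P.length : Int) + m = (((P ++ rest).length : Nat) : Int) - 1)
      = decide ((m : Int) = (rest.length : Int) - 1) := by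
    simp only [List.length_append]; rw [decide_eq_decide]; push_cast; omega
  have e5g : PySem.List.pyGet? (P ++ rest) ((P.length : Int) + m + 1)
      = PySem.List.pyGet? rest ((m : Int) + 1) := by
    have e : (P.length : Int) + m + 1 = (P.length : Int) + ((m + 1 : Nat) : Int) := by
      push_cast; ring
    have e' : (m : Int) + 1 = ((m + 1 : Nat) : Int) := by push_cast; ring
    rw [e, e', key (m + 1)]
  have e4 : (decide ((P.length : Int) + m = 0)
        || (PySem.List.pyGet? (P ++ rest) ((P.length : Int) + m - 1) == some ' '))
      = (decide ((m : Int) = 0) || (PySem.List.pyGet? rest ((m : Int) - 1) == some ' ')) := by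
    cases m with
    | zero =>
        have hP : P.getLast? = some ' ' := by
          rcases h with h | h
          · omega
          · exact h
        have hPne : P ≠ [] := by intro e; subst e; simp at hP
        have hL1 : 1 ≤ P.length := by
          cases P with
          | nil => simp at hPne
          | cons a b => simp
        have d1 : decide ((P.length : Int) + (0 : Nat) = 0) = false := by
          simp; omega
        have g1 : PySem.List.pyGet? (P ++ rest) ((P.length : Int) + (0 : Nat) - 1)
            = some ' ' := by
          have e : (P.length : Int) + (0 : Nat) - 1 = ((P.length - 1 : Nat) : Int) := by
            push_cast; omega
          rw [e, PySem.List.pyGet?_natCast, List.getElem?_append_left (by omega)]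
          rw [← List.getLast?_eq_getElem?]
          exact hP
        rw [d1, g1]
        simp
    | succ m' =>
        have d1 : decide ((P.length : Int) + ((m' + 1 : Nat) : Int) = 0) = false := by
          simp; omega
        have d2 : decide (((m' + 1 : Nat) : Int) = 0) = false := by simp; omega
        have g1 : PySem.List.pyGet? (P ++ rest) ((P.length : Int) + ((m' + 1 : Nat) : Int) - 1)
            = PySem.List.pyGet? rest (((m' + 1 : Nat) : Int) - 1) := by
          have e : (P.length : Int) + ((m' + 1 : Nat) : Int) - 1
              = (P.length : Int) + ((m' : Nat) : Int) := by push_cast; ring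
          have e' : ((m' + 1 : Nat) : Int) - 1 = ((m' : Nat) : Int) := by push_cast; ring
          rw [e, e', key m']
        rw [d1, d2, g1]
  rw [e0, e2, e5d, e5g, e4, key m]

theorem condB_shift (P rest : List Char) (j : Nat)
    (hP : P.getLast? = some ' ') (hhd : ∀ c, rest.head? = some c → c ≠ ' ') :
    condB (P ++ rest) ((P.length : Int) + j) = condB rest j := by
  unfold condB
  cases j with
  | zero =>
      have hA : PySem.List.pyGet? (P ++ rest) ((P.length : Int) + (0 : Nat))
          = PySem.List.pyGet? rest ((0 : Nat) : Int) := pyGet?_shift P rest 0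
      have hB : PySem.List.pyGet? rest ((0 : Nat) : Int) = rest.head? := by
        rw [PySem.List.pyGet?_natCast]
        cases rest <;> simp
      have hne : (PySem.List.pyGet? rest ((0 : Nat) : Int) == some ' ') = false := by
        rw [hB]
        cases hh : rest.head? with
        | none => simp
        | some c => simpa using hhd c hh
      rw [hA, hne]
      simp
  | succ j' =>
      have hA : PySem.List.pyGet? (P ++ rest) ((P.length : Int) + ((j' + 1 : Nat) : Int))
          = PySem.List.pyGet? rest ((j' + 1 : Nat) : Int) := pyGet?_shift P rest (j' + 1)
      have hL : loneB (P ++ rest) ((P.length : Int) + ((j' + 1 : Nat) : Int) - 1)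
          = loneB rest (((j' + 1 : Nat) : Int) - 1) := by
        have e : (P.length : Int) + ((j' + 1 : Nat) : Int) - 1
            = (P.length : Int) + ((j' : Nat) : Int) := by push_cast; ring
        have e' : ((j' + 1 : Nat) : Int) - 1 = ((j' : Nat) : Int) := by push_cast; ring
        rw [e, e', loneB_shift P rest j' (Or.inr hP)]
      have hR : loneB (P ++ rest) ((P.length : Int) + ((j' + 1 : Nat) : Int) + 1)
          = loneB rest (((j' + 1 : Nat) : Int) + 1) := by
        have e : (P.length : Int) + ((j' + 1 : Nat) : Int) + 1
            = (P.length : Int) + ((j' + 2 : Nat) : Int) := by push_cast; ring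
        have e' : ((j' + 1 : Nat) : Int) + 1 = ((j' + 2 : Nat) : Int) := by push_cast; ring
        rw [e, e', loneB_shift P rest (j' + 2) (Or.inl (by omega))]
      rw [hA, hL, hR]

-- at the boundary space after the leading token t, the left lone-test is `isInitial t`
theorem lone_left (t su : List Char) (ht : goodTok t) :
    loneB (t ++ ' ' :: su) ((t.length : Int) - 1) = isInitial t := by
  obtain ⟨htne, htns⟩ := ht
  match t, htne with
  | [c], _ =>
      have e : (([c].length : Nat) : Int) - 1 = ((0 : Nat) : Int) := by simp
      rw [e]
      unfold loneB
      have g0 : PySem.List.pyGet? ([c] ++ ' ' :: su) ((0 : Nat) : Int) = some c := by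
        rw [PySem.List.pyGet?_natCast]; rfl
      have g1 : PySem.List.pyGet? ([c] ++ ' ' :: su) (((0 : Nat) : Int) + 1) = some ' ' := by
        have e1 : ((0 : Nat) : Int) + 1 = ((1 : Nat) : Int) := by norm_num
        rw [e1, PySem.List.pyGet?_natCast]; rfl
      rw [g0, g1]
      simp [isInitial, PySem.Chars.strIsalpha, List.length_append]
      intro _
      omega
  | c :: d :: tl, _ =>
      have e : (((c :: d :: tl).length : Nat) : Int) - 1 = ((tl.length + 1 : Nat) : Int) := by
        simp
      rw [e]
      unfold loneB
      have e1 : ((tl.length + 1 : Nat) : Int) - 1 = ((tl.length : Nat) : Int) := by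
        push_cast; ring
      have snd : PySem.List.pyGet? ((c :: d :: tl) ++ ' ' :: su)
            (((tl.length + 1 : Nat) : Int) - 1)
          = some ((c :: d :: tl)[tl.length]'(by simp)) := by
        rw [e1, PySem.List.pyGet?_natCast, List.getElem?_append_left (by simp)]
        exact List.getElem?_eq_getElem (by simp)
      have hmem : (c :: d :: tl)[tl.length]'(by simp) ∈ c :: d :: tl := List.getElem_mem _
      have hxs : ((c :: d :: tl)[tl.length]'(by simp) == ' ') = false := by
        have hns := htns _ hmem
        simp only [beq_eq_false_iff_ne, ne_eq]
        intro he
        rw [he] at hns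
        simp [PySem.Chars.isspace] at hns
      have d0 : decide (((tl.length + 1 : Nat) : Int) = 0) = false := by
        simp
        omega
      rw [snd, d0]
      have : (some ((c :: d :: tl)[tl.length]'(by simp)) == some ' ') = false := by
        simpa using hxs
      rw [this]
      simp [isInitial]

-- the right lone-test at the head of the joined suffix is `isInitial u`
theorem lone_head (u : List Char) (more : List (List Char)) (hu : goodTok u)
    (hm : ∀ v ∈ more, goodTok v) :
    loneB (' ' :: PySem.Chars.join [' '] (u :: more)) 1 = isInitial u := by
  obtain ⟨hune, huns⟩ := hu
  match u, hune with
  | [c], _ =>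
      cases more with
      | nil =>
          rw [PySem.Chars.join_singleton]
          simp [loneB, isInitial, PySem.List.pyGet?, PySem.List.pyIdx?, PySem.Chars.strIsalpha]
      | cons v mm =>
          rw [PySem.Chars.join_cons_cons]
          have hs : [c] ++ [' '] ++ PySem.Chars.join [' '] (v :: mm)
              = c :: ' ' :: PySem.Chars.join [' '] (v :: mm) := by simp
          rw [hs]
          have h1 : (0:Int) ≤ ((PySem.Chars.join [' '] (v :: mm)).length : Int) + 1 := by
            positivity
          have h2 : (0:Int) ≤ ((PySem.Chars.join [' '] (v :: mm)).length : Int) + 1 + 1 := by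
            positivity
          have h3 : (2:Int) ≤ ((PySem.Chars.join [' '] (v :: mm)).length : Int) + 1 + 1 := by
            omega
          simp [loneB, isInitial, PySem.List.pyGet?, PySem.List.pyIdx?,
            PySem.Chars.strIsalpha, h1, h2, h3]
  | c :: d :: tl, _ =>
      have hd : d ≠ ' ' := by
        have hns := huns d (by simp)
        intro he
        rw [he] at hns
        simp [PySem.Chars.isspace] at hns
      have core : ∀ (r : List Char), loneB (' ' :: c :: d :: r) 1 = isInitial (c :: d :: r) := by
        intro r
        have h1 : (0:Int) ≤ (r.length : Int) + 1 := by positivity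
        have h2 : (0:Int) ≤ (r.length : Int) + 1 + 1 := by positivity
        have h3 : (2:Int) ≤ (r.length : Int) + 1 + 1 := by omega
        simp [loneB, isInitial, PySem.List.pyGet?, PySem.List.pyIdx?,
          PySem.Chars.strIsalpha, h1, h2, h3, hd]
        intro _ h
        omega
      cases more with
      | nil =>
          rw [PySem.Chars.join_singleton]
          have := core tl
          simpa [isInitial] using this
      | cons v mm =>
          rw [PySem.Chars.join_cons_cons]
          have hs : (c :: d :: tl) ++ [' '] ++ PySem.Chars.join [' '] (v :: mm)
              = c :: d :: (tl ++ ' ' :: PySem.Chars.join [' '] (v :: mm)) := by simp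
          rw [hs]
          have := core (tl ++ ' ' :: PySem.Chars.join [' '] (v :: mm))
          rw [this]
          simp [isInitial]

theorem keepScan_nospace (t : List Char) (hns : ∀ c ∈ t, PySem.Chars.isspace c = false) :
    keepScan t = t := by
  unfold keepScan
  have hf : (List.range t.length).filter (fun (k : Nat) => !condB t (k : Int))
      = List.range t.length := by
    apply List.filter_eq_self.mpr
    intro k hk
    have hk' : k < t.length := List.mem_range.mp hk
    have hget : PySem.List.pyGet? t (k : Int) = some t[k] := by
      rw [PySem.List.pyGet?_natCast]
      exact List.getElem?_eq_getElem hk'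
    have hne : (PySem.List.pyGet? t (k : Int) == some ' ') = false := by
      rw [hget]
      simp only [beq_eq_false_iff_ne, ne_eq, Option.some.injEq]
      intro he
      have := hns _ (List.getElem_mem hk')
      rw [he] at this
      simp [PySem.Chars.isspace] at this
    simp [condB_false_of_not_space _ _ hne]
  rw [hf, map_getD_range]

theorem keepScan_join : ∀ (rest : List (List Char)) (t : List Char),
    (∀ u ∈ t :: rest, goodTok u) →
    keepScan (PySem.Chars.join [' '] (t :: rest)) = t ++ glue t rest := by
  intro rest
  induction rest with
  | nil =>
      intro t hg
      obtain ⟨htne, htns⟩ := hg t (by simp)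
      rw [PySem.Chars.join_singleton, keepScan_nospace t htns]
      simp [glue]
  | cons u more ih =>
      intro t hg
      obtain ⟨htne, htns⟩ := hg t (by simp)
      obtain ⟨hune, huns⟩ := hg u (by simp)
      have hJ : PySem.Chars.join [' '] (t :: u :: more)
          = (t ++ [' ']) ++ PySem.Chars.join [' '] (u :: more) := by
        rw [PySem.Chars.join_cons_cons]
      set SU := PySem.Chars.join [' '] (u :: more) with hSU
      set P := t ++ [' '] with hP
      have hPlen : P.length = t.length + 1 := by simp [hP]
      have hPlast : P.getLast? = some ' ' := by simp [hP]
      have hSUhead : ∀ c, SU.head? = some c → c ≠ ' ' := by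
        obtain ⟨a, u', hu'⟩ := List.exists_cons_of_ne_nil hune
        intro c hc
        have he : SU = a :: (u' ++ (if more.isEmpty then []
            else ' ' :: PySem.Chars.join [' '] more)) := by
          rw [hSU, hu', join_cons]
          simp
        rw [he] at hc
        have hca : a = c := by simpa using hc
        have hns := huns a (by rw [hu']; simp)
        intro heq
        rw [hca, heq] at hns
        simp [PySem.Chars.isspace] at hns
      have hslen : ((P ++ SU).length) = (t.length + 1) + SU.length := by
        simp [hPlen]
      rw [hJ]
      unfold keepScan
      rw [hslen, List.range_add, List.range_succ]
      rw [List.filter_append, List.filter_append, List.map_append, List.map_append]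
      -- piece 1: the characters of t survive
      have piece1 : (List.map (fun (k : Nat) => (P ++ SU).getD k ' ')
          (List.filter (fun (k : Nat) => !condB (P ++ SU) (k : Int)) (List.range t.length))) = t := by
        have hfil : (List.filter (fun (k : Nat) => !condB (P ++ SU) (k : Int))
            (List.range t.length)) = List.range t.length := by
          apply List.filter_eq_self.mpr
          intro k hk
          have hk' : k < t.length := List.mem_range.mp hk
          have hget : PySem.List.pyGet? (P ++ SU) (k : Int) = some t[k] := by
            rw [PySem.List.pyGet?_natCast, List.getElem?_append_left (by omega),
              hP, List.getElem?_append_left hk']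
            exact List.getElem?_eq_getElem hk'
          have hne : (PySem.List.pyGet? (P ++ SU) (k : Int) == some ' ') = false := by
            rw [hget]
            simp only [beq_eq_false_iff_ne, ne_eq, Option.some.injEq]
            intro he
            have := htns _ (List.getElem_mem hk')
            rw [he] at this
            simp [PySem.Chars.isspace] at this
          simp [condB_false_of_not_space _ _ hne]
        rw [hfil]
        have : ∀ k ∈ List.range t.length, (P ++ SU).getD k ' ' = t.getD k ' ' := by
          intro k hk
          have hk' : k < t.length := List.mem_range.mp hk
          rw [List.getD_eq_getElem?_getD, List.getD_eq_getElem?_getD,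
            List.getElem?_append_left (by omega),
            hP, List.getElem?_append_left hk']
        rw [List.map_congr_left this, map_getD_range]
      -- piece 2: the boundary space survives iff the two tokens are not both initials
      have hsp : PySem.List.pyGet? (P ++ SU) ((t.length : Nat) : Int) = some ' ' := by
        rw [PySem.List.pyGet?_natCast, List.getElem?_append_left (by omega),
          hP, List.getElem?_append_right (by omega)]
        simp
      have hassoc : P ++ SU = t ++ ' ' :: SU := by simp [hP]
      have hll : loneB (P ++ SU) (((t.length : Nat) : Int) - 1) = isInitial t := by
        rw [hassoc]
        exact lone_left t SU ⟨htne, htns⟩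
      have hlr : loneB (P ++ SU) (((t.length : Nat) : Int) + 1) = isInitial u := by
        rw [hassoc]
        have e : ((t.length : Nat) : Int) + 1 = ((t.length : Nat) : Int) + ((1 : Nat) : Int) := by
          norm_num
        rw [e, loneB_shift t (' ' :: SU) 1 (Or.inl (by omega))]
        exact lone_head u more ⟨hune, huns⟩ (fun v hv => hg v (by simp [hv]))
      have hcondsp : condB (P ++ SU) ((t.length : Nat) : Int) = (isInitial t && isInitial u) := by
        unfold condB
        rw [hsp, hll, hlr]
        simp
      have piece2 : (List.map (fun (k : Nat) => (P ++ SU).getD k ' ')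
          (List.filter (fun (k : Nat) => !condB (P ++ SU) (k : Int)) [t.length]))
          = if isInitial t && isInitial u then [] else [' '] := by
        have hgd : (P ++ SU).getD t.length ' ' = ' ' := by
          rw [List.getD_eq_getElem?_getD, List.getElem?_append_left (by omega),
            hP, List.getElem?_append_right (by omega)]
          simp
        cases hb : (isInitial t && isInitial u) with
        | true => simp [hcondsp, hb]
        | false =>
            simp [hcondsp, hb]
            rw [← List.getD_eq_getElem?_getD]
            exact hgd
      -- piece 3: the suffix is the scan of SU
      have piece3 : (List.map (fun (k : Nat) => (P ++ SU).getD k ' ')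
          (List.filter (fun (k : Nat) => !condB (P ++ SU) (k : Int))
            (List.map (fun j => t.length + 1 + j) (List.range SU.length))))
          = u ++ glue u more := by
        rw [List.filter_map, List.map_map]
        have hcsh : ∀ j ∈ List.range SU.length,
            ((fun (k : Nat) => !condB (P ++ SU) (k : Int)) ∘ (fun j => t.length + 1 + j)) j
            = (fun (j : Nat) => !condB SU (j : Int)) j := by
          intro j _
          simp only [Function.comp]
          have e : ((t.length + 1 + j : Nat) : Int) = ((P.length : Nat) : Int) + (j : Nat) := by
            rw [hPlen]; push_cast; ring
          rw [e, condB_shift P SU j hPlast hSUhead]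
        rw [List.filter_congr hcsh]
        have hmap : ∀ j ∈ List.filter (fun (j : Nat) => !condB SU (j : Int)) (List.range SU.length),
            ((fun (k : Nat) => (P ++ SU).getD k ' ') ∘ (fun j => t.length + 1 + j)) j
            = SU.getD j ' ' := by
          intro j _
          simp only [Function.comp]
          rw [List.getD_eq_getElem?_getD, List.getD_eq_getElem?_getD,
            List.getElem?_append_right (l₁ := P) (l₂ := SU) (by omega)]
          congr 2
          omega
        rw [List.map_congr_left hmap]
        exact ih u (fun v hv => hg v (by simp [hv]))
      rw [piece1, piece2, piece3]
      cases hb : (isInitial t && isInitial u) with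
      | true => simp [glue, hb]
      | false => simp [glue, hb]

-- ===== second pass =====
theorem enumerate_pos_map (tl : List (List Char)) : ∀ (k : Int), 0 < k →
    (PySem.List.enumerate tl k).map (fun p => fixTok p.1 p.2) = tl.map fixTail := by
  induction tl with
  | nil => intro k hk; simp [PySem.List.enumerate]
  | cons x xs ih =>
      intro k hk
      simp only [PySem.List.enumerate, List.map_cons]
      rw [ih (k+1) (by omega)]
      simp [fixTok, fixTail, hk]

-- ===== VERDICT (by name: the statement is the Claim_ definition above) =====
theorem clean_contact_name_py_spec : Claim_equal_clean_contact_name_py := by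
  intro name _
  show clean_contact_name_py name = clean_contact_name_py_alt name
  unfold clean_contact_name_py clean_contact_name_py_alt
  have hgood : ∀ t ∈ PySem.Chars.split₀ (PySem.Chars.strip name.toList), goodTok t :=
    split₀_tokens _
  cases hp : PySem.Chars.split₀ (PySem.Chars.strip name.toList) with
  | nil =>
      simp only [hp, mergeA_nil]
      simp [PySem.List.enumerate, PySem.Chars.join_nil, PySem.List.pyRange_one,
        PySem.Chars.split₀, PySem.Chars.split₀.go]
      rfl
  | cons t rest =>
      simp only [hp]
      have hgood' : ∀ u ∈ t :: rest, goodTok u := by rw [← hp]; exact hgood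
      have hscan := scan_eq_keepScan (PySem.Chars.join [' '] (t :: rest))
      have hksj := keepScan_join rest t hgood'
      have hJm := J_mergeA (t :: rest).length t rest le_rfl hgood'
      have hmgood : ∀ v ∈ mergeA (t :: rest), goodTok v := mergeA_good _ hgood'
      have hsplit : PySem.Chars.split₀ (PySem.Chars.join [' '] (mergeA (t :: rest)))
          = mergeA (t :: rest) := split₀_join _ hmgood
      obtain ⟨h0, tl, hmA⟩ := List.exists_cons_of_ne_nil (mergeA_ne_nil t rest)
      rw [hscan, hksj, ← hJm, hsplit, hmA]
      rw [PySem.List.foldl_append_singleton_eq_map]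
      have hen : PySem.List.enumerate (h0 :: tl) 0 = (0, h0) :: PySem.List.enumerate tl 1 := by
        simp [PySem.List.enumerate]
      rw [hen]
      simp only [List.map_cons, List.nil_append]
      rw [enumerate_pos_map tl 1 (by norm_num)]
      have hfix0 : fixTok 0 h0 = capTok h0 := by simp [fixTok]
      rw [hfix0]
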